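-- pv_equiv track=rewrite | github.com/gauraviitp/python-programs | LeetCode.py | minSumOfLengths
-- ===== SOURCE A (Python) =====
-- def minSumOfLengths(arr, target: int) -> int:
--     n = len(arr)
--     res = []
--     lo, hi, s = 0, 1, arr[0]
--     while lo < n and (hi < n or s == target):
--         while hi < n and s < target:
--             s += arr[hi]
--             hi += 1
--         if s == target:
--             res.append([lo, hi-1])
--             s -= arr[lo]
--             lo += 1
--         while s > target and lo < hi:
--             s -= arr[lo]
--             lo += 1
--         hi = max(lo, hi)
--     okay = False
--     res.sort(key=lambda x: x[1] - x[0] + 1)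
--     if len(res) < 2:
--         return -1
--     ans = res[0][1]-res[0][0]+1
--     for i in range(1, len(res)):
--         if res[i][0] > res[0][1] or res[i][1] < res[0][0]:
--             ans += res[i][1]-res[i][0]+1
--             okay = True
--             break
--     if okay:
--         return ans
--     else:
--         return -1
-- ===== SOURCE B (Python) =====
-- def minSumOfLengths(arr, target: int) -> int:
--     # flat state-machine: one micro-step loop instead of nested while-loops, no sort
--     n = len(arr)
--     res = []
--     lo, hi, s = 0, 1, arr[0]
--     while True:
--         if hi < n and s < target:
--             s += arr[hi]
--             hi += 1
--         elif s == target and lo < n: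
--             res.append((lo, hi - 1))
--             s -= arr[lo]
--             lo += 1
--         elif s > target and lo < hi:
--             s -= arr[lo]
--             lo += 1
--         else:
--             break
--     best = None
--     for w in res:
--         if best is None or w[1] - w[0] < best[1] - best[0]:
--             best = w
--     if best is None:
--         return -1
--     second = None
--     for w in res:
--         if (w[0] > best[1] or w[1] < best[0]) and (second is None or w[1] - w[0] < second[1] - second[0]):
--             second = w
--     if second is None:
--         return -1
--     return (best[1] - best[0] + 1) + (second[1] - second[0] + 1)
-- ===== Notes on version B (the rewrite author's own statement) =====
-- stated objective: alternative
-- what changed: B replaces A's three nested while-loops by one flat micro-step state machine (each iteration does exactly one of: extend right, emit+shrink, shrink) and replaces A's sort-of-windows-by-length-plus-scan selection by two linear min-scans (shortest window, then shortest window disjoint from it), removing the sort.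
-- outside the precondition, e.g. on minSumOfLengths([0, 0], 0): A returns 1, B returns 0; on minSumOfLengths([5, 3], -2): A does not finish within the time limit, B returns -1
import Mathlib
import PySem

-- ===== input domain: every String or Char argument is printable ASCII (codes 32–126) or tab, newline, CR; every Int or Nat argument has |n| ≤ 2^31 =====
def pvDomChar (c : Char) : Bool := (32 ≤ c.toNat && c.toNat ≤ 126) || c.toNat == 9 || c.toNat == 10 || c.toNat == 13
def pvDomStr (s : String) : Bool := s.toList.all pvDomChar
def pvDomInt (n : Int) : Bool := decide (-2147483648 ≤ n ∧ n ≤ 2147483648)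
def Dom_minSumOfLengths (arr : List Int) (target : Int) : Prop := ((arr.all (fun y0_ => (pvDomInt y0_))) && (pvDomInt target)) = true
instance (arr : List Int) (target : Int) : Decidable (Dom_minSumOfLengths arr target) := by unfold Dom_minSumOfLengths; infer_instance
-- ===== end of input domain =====

-- B: replaces A's three nested while-loops by one flat micro-step state machine (one loop, one
-- action per iteration) and replaces A's sort-by-length-plus-scan selection by two linear
-- min-scans (alternative algorithm, same results on Pre_).


-- ===== PORT A =====
-- inner `while hi < n and s < target: s += arr[hi]; hi += 1` (index always in range under the guard)
-- gas = arr.length - hi at every call, so the gas never runs out while the guard holds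
def aFill (arr : List Int) (target : Int) : Nat → Int → Nat → Int × Nat
  | 0, s, hi => (s, hi)
  | gas + 1, s, hi =>
    if hi < arr.length ∧ s < target then aFill arr target gas (s + arr.getD hi 0) (hi + 1)
    else (s, hi)

-- inner `while s > target and lo < hi: s -= arr[lo]; lo += 1`
-- gas = hi - lo at every call
def aDrop (arr : List Int) (target : Int) : Nat → Int → Nat → Nat → Int × Nat
  | 0, s, lo, _ => (s, lo)
  | gas + 1, s, lo, hi =>
    if target < s ∧ lo < hi then aDrop arr target gas (s - arr.getD lo 0) (lo + 1) hi
    else (s, lo)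

-- outer `while lo < n and (hi < n or s == target)` with fuel (the Python loop can diverge outside Pre_;
-- inside Pre_ each iteration increases lo+hi, so 2*n+2 steps always suffice — proved below)
def aLoop (arr : List Int) (target : Int) : Nat → Nat → Nat → Int → List (Int × Int) → List (Int × Int)
  | 0, _, _, _, res => res
  | fuel + 1, lo, hi, s, res =>
    if lo < arr.length ∧ (hi < arr.length ∨ s = target) then
      let p1 := aFill arr target (arr.length - hi) s hi
      let st : Int × Nat × List (Int × Int) :=
        if p1.1 = target then (p1.1 - arr.getD lo 0, lo + 1, res ++ [((lo : Int), (p1.2 : Int) - 1)])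
        else (p1.1, lo, res)
      let p2 := aDrop arr target (p1.2 - st.2.1) st.1 st.2.1 p1.2
      aLoop arr target fuel p2.2 (max p2.2 p1.2) p2.1 st.2.2
    else res

def minSumOfLengths (arr : List Int) (target : Int) : Int :=
  match arr with
  | [] => 0   -- Python raises IndexError on arr[0]; excluded by Pre_
  | a0 :: _ =>
    let res := aLoop arr target (2 * arr.length + 2) 0 1 a0 []
    let sres := PySem.List.sorted res (fun w => w.2 - w.1 + 1) false
    if sres.length < 2 then (-1 : Int)
    else
      match sres with
      | [] => -1  -- unreachable (length ≥ 2)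
      | w0 :: rest =>
        -- `for i in range(1, len(res)): if … : ans += …; okay = True; break` = first match in the tail
        match rest.find? (fun w => decide (w0.2 < w.1) || decide (w.2 < w0.1)) with
        | some w => (w0.2 - w0.1 + 1) + (w.2 - w.1 + 1)
        | none => -1

-- ===== PORT B =====
-- B's single `while True` micro-step loop: each iteration performs exactly one elementary action
-- (extend right / emit window and shrink / shrink) or breaks.  Fuel: each step increases lo+hi,
-- both bounded by n, so 2*n+2 steps always suffice inside Pre_ (proved below).
def bRun (arr : List Int) (target : Int) : Nat → Nat → Nat → Int → List (Int × Int) → List (Int × Int)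
  | 0, _, _, _, res => res
  | fuel + 1, lo, hi, s, res =>
    if hi < arr.length ∧ s < target then
      bRun arr target fuel lo (hi + 1) (s + arr.getD hi 0) res
    else if s = target ∧ lo < arr.length then
      bRun arr target fuel (lo + 1) hi (s - arr.getD lo 0) (res ++ [((lo : Int), (hi : Int) - 1)])
    else if target < s ∧ lo < hi then
      bRun arr target fuel (lo + 1) hi (s - arr.getD lo 0) res
    else res

-- `best = None; for w in res: if best is None or ... : best = w`
def bBest (res : List (Int × Int)) : Option (Int × Int) :=
  res.foldl (fun best w =>
    match best with
    | none => some w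
    | some b => if w.2 - w.1 < b.2 - b.1 then some w else best) none

def bSecond (best : Int × Int) (res : List (Int × Int)) : Option (Int × Int) :=
  res.foldl (fun sec w =>
    if (decide (best.2 < w.1) || decide (w.2 < best.1)) &&
       (match sec with | none => true | some b => decide (w.2 - w.1 < b.2 - b.1)) then some w
    else sec) none

def minSumOfLengths_alt (arr : List Int) (target : Int) : Int :=
  match arr with
  | [] => -1   -- Python raises IndexError on arr[0]; outside Pre_
  | a0 :: _ =>
    let res := bRun arr target (2 * arr.length + 2) 0 1 a0 []
    match bBest res with
    | none => -1
    | some best =>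
      match bSecond best res with
      | none => -1
      | some sec => (best.2 - best.1 + 1) + (sec.2 - sec.1 + 1)

-- ===== PRECONDITION & SPEC =====
-- Pre_ excludes the empty list (A raises IndexError on arr[0]) and non-positive targets: for a
-- negative target A's outer loop can spin forever (e.g. [5, 3] with target -2) and which such runs
-- terminate has no closed-form description (where one does terminate, A and B agree); at target 0 A
-- appends degenerate empty "windows" [lo, lo-1] whose handling by the sort-and-scan is an accident
-- of the representation. For target ≥ 1 A always terminates, on arbitrary integer elements.
def Pre_minSumOfLengths (arr : List Int) (target : Int) : Prop :=
  arr ≠ [] ∧ 1 ≤ target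
instance (arr : List Int) (target : Int) : Decidable (Pre_minSumOfLengths arr target) := by
  unfold Pre_minSumOfLengths; infer_instance

def pvWitness_minSumOfLengths : List Int × Int := ([3, 2, 2, 4, 3], 3)

def Spec_minSumOfLengths (arr : List Int) (target : Int) (out : Int) : Prop := out = minSumOfLengths_alt arr target
instance (arr : List Int) (target : Int) (out : Int) : Decidable (Spec_minSumOfLengths arr target out) := by unfold Spec_minSumOfLengths; infer_instance

-- ===== CLAIM (what is proved, stated in full; the proofs are below) =====
def Claim_equal_minSumOfLengths : Prop := ∀ (arr : List Int) (target : Int), Dom_minSumOfLengths arr target → Pre_minSumOfLengths arr target → Spec_minSumOfLengths arr target (minSumOfLengths arr target)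

-- ===== LEMMAS AND PROOFS =====

-- prefix sums and segment sums (loop-state bookkeeping)
def pfx (arr : List Int) (k : Nat) : Int := (arr.take k).sum
lemma pfx_succ (arr : List Int) (k : Nat) (h : k < arr.length) :
    pfx arr (k + 1) = pfx arr k + arr.getD k 0 := by
  unfold pfx
  rw [List.take_add_one, List.sum_append, List.getD_eq_getElem arr 0 h]
  simp [List.getElem?_eq_getElem h]
def seg (arr : List Int) (i j : Nat) : Int := pfx arr j - pfx arr i
lemma aFill_spec (arr : List Int) (target : Int) (lo : Nat) :
    ∀ (gas : Nat) (s : Int) (hi : Nat), arr.length ≤ gas + hi → hi ≤ arr.length →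
    s = seg arr lo hi →
    hi ≤ (aFill arr target gas s hi).2 ∧ (aFill arr target gas s hi).2 ≤ arr.length ∧
    (aFill arr target gas s hi).1 = seg arr lo (aFill arr target gas s hi).2 ∧
    (target ≤ (aFill arr target gas s hi).1 ∨ (aFill arr target gas s hi).2 = arr.length) ∧
    (∀ h, hi ≤ h → h < (aFill arr target gas s hi).2 → seg arr lo h < target) := by
  intro gas
  induction gas with
  | zero =>
    intro s hi hgas hhi hs
    have : hi = arr.length := by omega
    subst this
    simp [aFill]
    exact ⟨hs, by omega⟩
  | succ gas ih =>
    intro s hi hgas hhi hs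
    rw [aFill]
    by_cases hc : hi < arr.length ∧ s < target
    · rw [if_pos hc]
      have hstep : s + arr.getD hi 0 = seg arr lo (hi + 1) := by
        have := pfx_succ arr hi hc.1
        unfold seg at *
        omega
      obtain ⟨q1, q2, q3, q4, q5⟩ := ih (s + arr.getD hi 0) (hi + 1) (by omega) (by omega) hstep
      refine ⟨by omega, q2, q3, q4, ?_⟩
      intro h hh1 hh2
      rcases Nat.eq_or_lt_of_le hh1 with he | hlt
      · rw [← he]
        omega
      · exact q5 h (by omega) hh2
    · rw [if_neg hc]
      refine ⟨le_refl _, hhi, hs, ?_, by omega⟩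
      rcases Nat.lt_or_ge hi arr.length with h1 | h1
      · left; by_contra hcon; exact hc ⟨h1, by omega⟩
      · right; omega
lemma aDrop_spec (arr : List Int) (target : Int) (hi : Nat) (hhi : hi ≤ arr.length) :
    ∀ (gas : Nat) (s : Int) (lo : Nat), hi ≤ gas + lo → lo ≤ hi → s = seg arr lo hi →
    lo ≤ (aDrop arr target gas s lo hi).2 ∧ (aDrop arr target gas s lo hi).2 ≤ hi ∧
    (aDrop arr target gas s lo hi).1 = seg arr (aDrop arr target gas s lo hi).2 hi ∧
    (∀ i, lo ≤ i → i < (aDrop arr target gas s lo hi).2 → target < seg arr i hi) ∧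
    ((aDrop arr target gas s lo hi).1 ≤ target ∨ (aDrop arr target gas s lo hi).2 = hi) := by
  intro gas
  induction gas with
  | zero =>
    intro s lo hgas hlo hs
    have : lo = hi := by omega
    subst this
    simp [aDrop]
    exact ⟨hs, by omega⟩
  | succ gas ih =>
    intro s lo hgas hlo hs
    rw [aDrop]
    by_cases hc : target < s ∧ lo < hi
    · rw [if_pos hc]
      have hstep : s - arr.getD lo 0 = seg arr (lo + 1) hi := by
        have := pfx_succ arr lo (by omega)
        unfold seg at *
        omega
      obtain ⟨q1, q2, q3, q4, q5⟩ := ih (s - arr.getD lo 0) (lo + 1) (by omega) (by omega) hstep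
      refine ⟨by omega, q2, q3, ?_, q5⟩
      intro i hi1 hi2
      rcases Nat.eq_or_lt_of_le hi1 with he | hlt
      · rw [← he]
        omega
      · exact q4 i (by omega) hi2
    · rw [if_neg hc]
      refine ⟨le_refl _, hlo, hs, by omega, ?_⟩
      rcases Nat.lt_or_ge lo hi with h1 | h1
      · left; by_contra hcon; exact hc ⟨by omega, h1⟩
      · right; omega

-- every pair the loop collects is a genuine (non-empty) window: start ≤ end
lemma aLoop_windows (arr : List Int) (target : Int) (htg : 1 ≤ target) :
    ∀ (fuel lo hi : Nat) (s : Int) (res : List (Int × Int)),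
    lo ≤ hi → hi ≤ arr.length → s = seg arr lo hi →
    (∀ w ∈ res, w.1 ≤ w.2) →
    ∀ w ∈ aLoop arr target fuel lo hi s res, w.1 ≤ w.2 := by
  intro fuel
  induction fuel with
  | zero =>
    intro lo hi s res _ _ _ hres
    exact hres
  | succ fuel ih =>
    intro lo hi s res hlo hhi hs hres
    by_cases hc : lo < arr.length ∧ (hi < arr.length ∨ s = target)
    · obtain ⟨f1, f2, f3, f4, f5⟩ := aFill_spec arr target lo (arr.length - hi) s hi (by omega) hhi hs
      set p1 := aFill arr target (arr.length - hi) s hi with hp1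
      by_cases hb : p1.1 = target
      · have hlop : lo < p1.2 := by
          rcases Nat.lt_or_ge lo p1.2 with h | h
          · exact h
          · exfalso
            have : lo = p1.2 := by omega
            rw [← this] at f3
            unfold seg at f3
            omega
        have hsB : p1.1 - arr.getD lo 0 = seg arr (lo + 1) p1.2 := by
          have := pfx_succ arr lo hc.1
          unfold seg at *
          omega
        obtain ⟨d1, d2, d3, _, _⟩ := aDrop_spec arr target p1.2 f2 (p1.2 - (lo + 1))
          (p1.1 - arr.getD lo 0) (lo + 1) (by omega) (by omega) hsB
        set p2 := aDrop arr target (p1.2 - (lo + 1)) (p1.1 - arr.getD lo 0) (lo + 1) p1.2 with hp2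
        have hEq : aLoop arr target (fuel + 1) lo hi s res =
            aLoop arr target fuel p2.2 (max p2.2 p1.2) p2.1
              (res ++ [((lo : Int), (p1.2 : Int) - 1)]) := by
          rw [aLoop, if_pos hc, ← hp1]
          dsimp only
          rw [if_pos hb]
        rw [hEq, Nat.max_eq_right d2]
        apply ih p2.2 p1.2 p2.1 _ d2 f2 d3
        intro w hw
        rw [List.mem_append, List.mem_singleton] at hw
        rcases hw with h | h
        · exact hres w h
        · subst h
          simp only
          omega
      · have hlop' : lo ≤ p1.2 := by omega
        obtain ⟨d1, d2, d3, _, _⟩ := aDrop_spec arr target p1.2 f2 (p1.2 - lo)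
          p1.1 lo (by omega) hlop' f3
        set p2 := aDrop arr target (p1.2 - lo) p1.1 lo p1.2 with hp2
        have hEq : aLoop arr target (fuel + 1) lo hi s res =
            aLoop arr target fuel p2.2 (max p2.2 p1.2) p2.1 res := by
          rw [aLoop, if_pos hc, ← hp1]
          dsimp only
          rw [if_neg hb]
        rw [hEq, Nat.max_eq_right d2]
        exact ih p2.2 p1.2 p2.1 res d2 f2 d3 hres
    · have hstop : aLoop arr target (fuel + 1) lo hi s res = res := by
        rw [aLoop, if_neg hc]
      rw [hstop]
      exact hres

-- ===== simulation: B's flat micro-step machine produces exactly A's window list =====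

-- a run of B's machine through A's fill phase
lemma fillSim (arr : List Int) (target : Int) (lo : Nat) (acc : List (Int × Int)) :
    ∀ (gas : Nat) (s : Int) (hi G : Nat), gas ≤ G →
    hi ≤ (aFill arr target gas s hi).2 ∧ (aFill arr target gas s hi).2 ≤ hi + gas ∧
    bRun arr target G lo hi s acc =
      bRun arr target (G - ((aFill arr target gas s hi).2 - hi)) lo
        (aFill arr target gas s hi).2 (aFill arr target gas s hi).1 acc := by
  intro gas
  induction gas with
  | zero => intro s hi G _; simp [aFill]
  | succ gas ih =>
    intro s hi G hG
    rw [aFill]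
    by_cases h : hi < arr.length ∧ s < target
    · rw [if_pos h]
      obtain ⟨G', rfl⟩ : ∃ G', G = G' + 1 := ⟨G - 1, by omega⟩
      obtain ⟨q1, q2, q3⟩ := ih (s + arr.getD hi 0) (hi + 1) G' (by omega)
      have hstep : bRun arr target (G' + 1) lo hi s acc =
          bRun arr target G' lo (hi + 1) (s + arr.getD hi 0) acc := by
        rw [bRun, if_pos h]
      refine ⟨by omega, by omega, ?_⟩
      rw [hstep, q3]
      congr 1
      omega
    · rw [if_neg h]
      refine ⟨le_refl _, by omega, ?_⟩
      congr 1
      omega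

-- a run of B's machine through A's drop phase
lemma dropSim (arr : List Int) (target : Int) (hi : Nat) (acc : List (Int × Int)) :
    ∀ (gas : Nat) (s : Int) (lo G : Nat), gas ≤ G →
    lo ≤ (aDrop arr target gas s lo hi).2 ∧ (aDrop arr target gas s lo hi).2 ≤ lo + gas ∧
    bRun arr target G lo hi s acc =
      bRun arr target (G - ((aDrop arr target gas s lo hi).2 - lo))
        (aDrop arr target gas s lo hi).2 hi (aDrop arr target gas s lo hi).1 acc := by
  intro gas
  induction gas with
  | zero => intro s lo G _; simp [aDrop]
  | succ gas ih =>
    intro s lo G hG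
    rw [aDrop]
    by_cases h : target < s ∧ lo < hi
    · rw [if_pos h]
      obtain ⟨G', rfl⟩ : ∃ G', G = G' + 1 := ⟨G - 1, by omega⟩
      obtain ⟨q1, q2, q3⟩ := ih (s - arr.getD lo 0) (lo + 1) G' (by omega)
      have hstep : bRun arr target (G' + 1) lo hi s acc =
          bRun arr target G' (lo + 1) hi (s - arr.getD lo 0) acc := by
        rw [bRun, if_neg (by rintro ⟨-, h2⟩; omega),
          if_neg (by rintro ⟨h1, -⟩; omega), if_pos h]
      refine ⟨by omega, by omega, ?_⟩
      rw [hstep, q3]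
      congr 1
      omega
    · rw [if_neg h]
      refine ⟨le_refl _, by omega, ?_⟩
      congr 1
      omega

lemma bRun_stop (arr : List Int) (target : Int) (G lo hi : Nat) (s : Int) (acc : List (Int × Int))
    (h1 : ¬(hi < arr.length ∧ s < target)) (h2 : ¬(s = target ∧ lo < arr.length))
    (h3 : ¬(target < s ∧ lo < hi)) :
    bRun arr target G lo hi s acc = acc := by
  cases G with
  | zero => rfl
  | succ G => rw [bRun, if_neg h1, if_neg h2, if_neg h3]

lemma aLoop_stop (arr : List Int) (target : Int) (F lo hi : Nat) (s : Int) (res : List (Int × Int))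
    (h : ¬(lo < arr.length ∧ (hi < arr.length ∨ s = target))) :
    aLoop arr target F lo hi s res = res := by
  cases F with
  | zero => rfl
  | succ F => rw [aLoop, if_neg h]

lemma aDrop_le (arr : List Int) (target : Int) :
    ∀ (gas : Nat) (s : Int) (lo hi : Nat), lo ≤ (aDrop arr target gas s lo hi).2 := by
  intro gas
  induction gas with
  | zero => intro s lo hi; exact le_refl _
  | succ gas ih =>
    intro s lo hi
    rw [aDrop]
    by_cases h : target < s ∧ lo < hi
    · rw [if_pos h]
      exact le_trans (by omega) (ih (s - arr.getD lo 0) (lo + 1) hi)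
    · rw [if_neg h]

lemma aDrop_progress (arr : List Int) (target : Int) (gas : Nat) (s : Int) (lo hi : Nat)
    (hs : target < s) (hlh : lo < hi) (hg : 1 ≤ gas) :
    lo + 1 ≤ (aDrop arr target gas s lo hi).2 := by
  obtain ⟨gas', rfl⟩ : ∃ g, gas = g + 1 := ⟨gas - 1, by omega⟩
  rw [aDrop, if_pos ⟨hs, hlh⟩]
  exact aDrop_le arr target gas' (s - arr.getD lo 0) (lo + 1) hi

-- the main simulation: from any outer-loop-head state of A (with the invariant below),
-- B's flat machine emits exactly the windows A's nested loops emit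
lemma loopSim (arr : List Int) (target : Int) (htg : 1 ≤ target) :
    ∀ (F lo hi : Nat) (s : Int) (acc : List (Int × Int)) (G : Nat),
    lo ≤ hi → hi ≤ arr.length → s = seg arr lo hi →
    (hi < arr.length ∨ s ≤ target ∨ hi ≤ lo) →
    2 * arr.length + 1 ≤ F + (lo + hi) → 2 * arr.length + 1 ≤ G + (lo + hi) →
    aLoop arr target F lo hi s acc = bRun arr target G lo hi s acc := by
  intro F
  induction F with
  | zero =>
    intro lo hi s acc G hlo hhi hs hinv hF hG
    omega
  | succ F ih =>
    intro lo hi s acc G hlo hhi hs hinv hF hG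
    by_cases hg : lo < arr.length ∧ (hi < arr.length ∨ s = target)
    · obtain ⟨f1, f2, f3, f4, f5⟩ := aFill_spec arr target lo (arr.length - hi) s hi (by omega) hhi hs
      set p1 := aFill arr target (arr.length - hi) s hi with hp1
      obtain ⟨-, -, hfill⟩ := fillSim arr target lo acc (arr.length - hi) s hi G (by omega)
      rw [← hp1] at hfill
      by_cases hb : p1.1 = target
      · -- emit step
        have hlop : lo < p1.2 := by
          rcases Nat.lt_or_ge lo p1.2 with h | h
          · exact h
          · exfalso
            have : lo = p1.2 := by omega
            rw [← this] at f3
            unfold seg at f3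
            omega
        have hsB : p1.1 - arr.getD lo 0 = seg arr (lo + 1) p1.2 := by
          have := pfx_succ arr lo hg.1
          unfold seg at *
          omega
        obtain ⟨d1, d2, d3, -, d5⟩ := aDrop_spec arr target p1.2 f2 (p1.2 - (lo + 1))
          (p1.1 - arr.getD lo 0) (lo + 1) (by omega) (by omega) hsB
        set p2 := aDrop arr target (p1.2 - (lo + 1)) (p1.1 - arr.getD lo 0) (lo + 1) p1.2 with hp2
        have hEq : aLoop arr target (F + 1) lo hi s acc =
            aLoop arr target F p2.2 (max p2.2 p1.2) p2.1
              (acc ++ [((lo : Int), (p1.2 : Int) - 1)]) := by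
          rw [aLoop, if_pos hg, ← hp1]
          dsimp only
          rw [if_pos hb]
        -- B side: fill steps, then one emit step, then drop steps
        obtain ⟨G2, hG1⟩ : ∃ G2, G - (p1.2 - hi) = G2 + 1 := ⟨G - (p1.2 - hi) - 1, by omega⟩
        have hemit : bRun arr target (G - (p1.2 - hi)) lo p1.2 p1.1 acc =
            bRun arr target G2 (lo + 1) p1.2 (p1.1 - arr.getD lo 0)
              (acc ++ [((lo : Int), (p1.2 : Int) - 1)]) := by
          rw [hG1, bRun, if_neg (by rintro ⟨-, h2⟩; omega), if_pos ⟨hb, hg.1⟩]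
        obtain ⟨-, -, hdrop⟩ := dropSim arr target p1.2
          (acc ++ [((lo : Int), (p1.2 : Int) - 1)]) (p1.2 - (lo + 1))
          (p1.1 - arr.getD lo 0) (lo + 1) G2 (by omega)
        rw [← hp2] at hdrop
        rw [hEq, Nat.max_eq_right d2, hfill, hemit, hdrop]
        exact ih p2.2 p1.2 p2.1 _ (G2 - (p2.2 - (lo + 1))) d2 f2 d3
          (by rcases d5 with h | h; exacts [Or.inr (Or.inl h), Or.inr (Or.inr (by omega))])
          (by omega) (by omega)
      · -- no emit; either a drop phase or immediate common stop
        have hlop' : lo ≤ p1.2 := by omega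
        obtain ⟨d1, d2, d3, -, d5⟩ := aDrop_spec arr target p1.2 f2 (p1.2 - lo)
          p1.1 lo (by omega) hlop' f3
        set p2 := aDrop arr target (p1.2 - lo) p1.1 lo p1.2 with hp2
        have hEq : aLoop arr target (F + 1) lo hi s acc =
            aLoop arr target F p2.2 (max p2.2 p1.2) p2.1 acc := by
          rw [aLoop, if_pos hg, ← hp1]
          dsimp only
          rw [if_neg hb]
        rcases lt_or_ge target p1.1 with hgt | hle
        · -- p1.1 > target: at least one drop step on both sides
          have hlop2 : lo < p1.2 := by
            rcases Nat.lt_or_ge lo p1.2 with h | h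
            · exact h
            · exfalso
              have : lo = p1.2 := by omega
              rw [← this] at f3
              unfold seg at f3
              omega
          have hprog : lo + 1 ≤ p2.2 :=
            aDrop_progress arr target (p1.2 - lo) p1.1 lo p1.2 hgt hlop2 (by omega)
          obtain ⟨-, -, hdrop⟩ := dropSim arr target p1.2 acc (p1.2 - lo) p1.1 lo
            (G - (p1.2 - hi)) (by omega)
          rw [← hp2] at hdrop
          rw [hEq, Nat.max_eq_right d2, hfill, hdrop]
          exact ih p2.2 p1.2 p2.1 acc _ d2 f2 d3
            (by rcases d5 with h | h; exacts [Or.inr (Or.inl h), Or.inr (Or.inr (by omega))])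
            (by omega) (by omega)
        · -- p1.1 < target: fill exhausted the array; both sides stop with acc
          have hlt : p1.1 < target := lt_of_le_of_ne hle hb
          have hn : p1.2 = arr.length := by rcases f4 with h | h; exacts [by omega, h]
          have hp2eq : p2 = (p1.1, lo) := by
            rw [hp2]
            cases hgg : p1.2 - lo with
            | zero => rfl
            | succ g => rw [aDrop, if_neg (by rintro ⟨h1, -⟩; omega)]
          rw [hEq, hp2eq]
          have hmax : max lo p1.2 = p1.2 := Nat.max_eq_right hlop'
          rw [hmax, hfill]
          rw [aLoop_stop arr target F lo p1.2 p1.1 acc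
            (by rintro ⟨-, h2 | h2⟩; exacts [by omega, hb h2])]
          rw [bRun_stop arr target _ lo p1.2 p1.1 acc
            (by rintro ⟨h1, -⟩; omega) (by rintro ⟨h1, -⟩; exact hb h1)
            (by rintro ⟨h1, -⟩; omega)]
    · -- A's outer guard is false: both machines stop with acc
      rw [aLoop_stop arr target _ lo hi s acc hg]
      symm
      rcases Nat.lt_or_ge lo arr.length with hlt | hge
      · -- hi ≥ n and s ≠ target; invariant rules out a B-drop step
        have hhin : ¬ hi < arr.length := by
          intro h; exact hg ⟨hlt, Or.inl h⟩
        have hst : s ≠ target := by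
          intro h; exact hg ⟨hlt, Or.inr h⟩
        apply bRun_stop
        · rintro ⟨h1, -⟩; exact hhin h1
        · rintro ⟨h1, -⟩; exact hst h1
        · rintro ⟨h1, h2⟩
          rcases hinv with h | h | h
          · exact hhin h
          · omega
          · omega
      · -- lo = hi = n, s = 0
        have hlohi : lo = hi := by omega
        have hs0 : s = 0 := by rw [hs, ← hlohi]; unfold seg; omega
        apply bRun_stop
        · rintro ⟨h1, -⟩; omega
        · rintro ⟨h1, -⟩; omega
        · rintro ⟨-, h2⟩; omega

-- ===== selection phase =====

lemma insertBy_find (key : Int × Int → Int) (P : Int × Int → Bool) (x : Int × Int) :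
    ∀ (L : List (Int × Int)), L.Pairwise (fun a b => key a ≤ key b) →
    (PySem.List.insertBy (fun a b => decide (key a < key b)) x L).find? P =
      match L.find? P with
      | none => if P x then some x else none
      | some y => if P x && decide (key x < key y) then some x else some y := by
  intro L
  induction L with
  | nil =>
    intro _
    simp [PySem.List.insertBy, List.find?]
  | cons y ys ih =>
    intro hpw
    rw [PySem.List.insertBy]
    by_cases hk : key x < key y
    · rw [if_pos (by simpa using hk)]
      by_cases hx : P x
      · rw [List.find?_cons_of_pos hx]
        by_cases hy : P y
        · rw [List.find?_cons_of_pos hy]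
          simp [hx, hk]
        · rw [List.find?_cons_of_neg hy]
          cases hf : ys.find? P with
          | none => simp [hx]
          | some z =>
            have hyz : key y ≤ key z :=
              List.rel_of_pairwise_cons hpw (List.mem_of_find?_eq_some hf)
            have hxz : key x < key z := by omega
            simp [hx, hxz]
      · rw [List.find?_cons_of_neg hx]
        cases hf2 : (y :: ys).find? P with
        | none => simp [hx]
        | some z => simp [hx]
    · rw [if_neg (by simpa using hk)]
      by_cases hy : P y
      · rw [List.find?_cons_of_pos hy, List.find?_cons_of_pos hy]
        simp [hk]
      · rw [List.find?_cons_of_neg hy, List.find?_cons_of_neg hy]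
        exact ih hpw.of_cons
lemma sorted_find (key : Int × Int → Int) (P : Int × Int → Bool) (xs : List (Int × Int)) :
    (PySem.List.sorted xs key false).find? P =
      xs.foldl (fun acc w => if P w then
        match acc with
        | none => some w
        | some y => if key w < key y then some w else acc
        else acc) none := by
  induction xs using List.reverseRecOn with
  | nil => simp [PySem.List.sorted]
  | append_singleton ys x ih =>
    have hsort : PySem.List.sorted (ys ++ [x]) key false =
        PySem.List.insertBy (fun a b => decide (key a < key b)) x (PySem.List.sorted ys key false) := by
      simp [PySem.List.sorted, List.foldl_append]
    rw [hsort, List.foldl_append,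
      insertBy_find key P x (PySem.List.sorted ys key false) (PySem.List.sorted_pairwise ys key),
      ← ih]
    cases hf : (PySem.List.sorted ys key false).find? P with
    | none =>
      by_cases hx : P x <;> simp [hx, List.foldl]
    | some y =>
      by_cases hx : P x
      · by_cases hk : key x < key y <;> simp [hx, hk, List.foldl]
      · simp [hx, List.foldl]
lemma head?_eq_find?_true (L : List (Int × Int)) :
    L.head? = L.find? (fun _ => true) := by
  cases L <;> simp
lemma sorted_shift (xs : List (Int × Int)) :
    PySem.List.sorted xs (fun w => w.2 - w.1 + 1) false =
      PySem.List.sorted xs (fun w => w.2 - w.1) false := by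
  simp only [PySem.List.sorted]
  simp

lemma bBest_eq (res : List (Int × Int)) :
    bBest res = res.foldl (fun acc w => if (fun (_ : Int × Int) => true) w then
      match acc with
      | none => some w
      | some y => if w.2 - w.1 < y.2 - y.1 then some w else acc
      else acc) none := rfl
lemma bSecond_eq (best : Int × Int) (res : List (Int × Int)) :
    bSecond best res = res.foldl
      (fun acc w => if (decide (best.2 < w.1) || decide (w.2 < best.1)) then
        match acc with
        | none => some w
        | some y => if w.2 - w.1 < y.2 - y.1 then some w else acc
        else acc) none := by
  unfold bSecond
  congr 1
  funext acc w
  cases acc with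
  | none => by_cases hA : (decide (best.2 < w.1) || decide (w.2 < best.1)) = true <;> simp [hA]
  | some y =>
    by_cases hA : (decide (best.2 < w.1) || decide (w.2 < best.1)) = true
    · by_cases hk : w.2 - w.1 < y.2 - y.1 <;> simp [hA, hk]
    · simp [hA]

-- sort-then-scan selection = two min-scans, on any list of genuine windows
lemma select_eq (R : List (Int × Int)) (hii : ∀ p ∈ R, p.1 ≤ p.2) :
    (let sres := PySem.List.sorted R (fun w => w.2 - w.1 + 1) false
     if sres.length < 2 then (-1 : Int)
     else
       match sres with
       | [] => -1
       | w0 :: rest =>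
         match rest.find? (fun w => decide (w0.2 < w.1) || decide (w.2 < w0.1)) with
         | some w => (w0.2 - w0.1 + 1) + (w.2 - w.1 + 1)
         | none => -1) =
    (match bBest R with
     | none => (-1 : Int)
     | some best =>
       match bSecond best R with
       | none => -1
       | some sec => (best.2 - best.1 + 1) + (sec.2 - sec.1 + 1)) := by
  show (if (PySem.List.sorted R (fun w => w.2 - w.1 + 1) false).length < 2 then (-1 : Int)
        else
          match PySem.List.sorted R (fun w => w.2 - w.1 + 1) false with
          | [] => -1
          | w0 :: rest =>
            match rest.find? (fun w => decide (w0.2 < w.1) || decide (w.2 < w0.1)) with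
            | some w => (w0.2 - w0.1 + 1) + (w.2 - w.1 + 1)
            | none => -1) = _
  rw [sorted_shift]
  have hbest : bBest R = (PySem.List.sorted R (fun w => w.2 - w.1) false).head? := by
    rw [bBest_eq, head?_eq_find?_true, sorted_find]
  cases hL : PySem.List.sorted R (fun w => w.2 - w.1) false with
  | nil =>
    have hRnil : R = [] := by
      have hperm := PySem.List.sorted_perm R (fun w => w.2 - w.1) false
      rw [hL] at hperm
      exact List.perm_nil.mp hperm.symm
    rw [hL] at hbest
    simp only [List.head?] at hbest
    rw [hbest]
    simp
  | cons h t =>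
    rw [hL] at hbest
    simp only [List.head?] at hbest
    rw [hbest]
    have hhR : h ∈ R := by
      have hmm := PySem.List.mem_sorted (x := h) (xs := R) (key := fun w => w.2 - w.1) (rev := false)
      rw [hL] at hmm
      exact hmm.1 List.mem_cons_self
    have hsec : bSecond h R =
        t.find? (fun w => decide (h.2 < w.1) || decide (w.2 < h.1)) := by
      rw [bSecond_eq, ← sorted_find, hL, List.find?_cons_of_neg (by simp; exact hii h hhR)]
    show (if (h :: t).length < 2 then (-1 : Int)
          else
            match t.find? (fun w => decide (h.2 < w.1) || decide (w.2 < h.1)) with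
            | some w => (h.2 - h.1 + 1) + (w.2 - w.1 + 1)
            | none => -1) =
      (match bSecond h R with
       | none => (-1 : Int)
       | some sec => (h.2 - h.1 + 1) + (sec.2 - sec.1 + 1))
    rw [hsec]
    cases hf : t.find? (fun w => decide (h.2 < w.1) || decide (w.2 < h.1)) with
    | none => cases t <;> simp
    | some w =>
      cases t with
      | nil => simp at hf
      | cons a b => simp

lemma main_eq : ∀ (arr : List Int) (target : Int),
    arr ≠ [] → 1 ≤ target →
    minSumOfLengths arr target = minSumOfLengths_alt arr target := by
  intro arr target hne htg
  cases arr with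
  | nil => exact absurd rfl hne
  | cons a0 rest =>
    have ha0 : a0 = seg (a0 :: rest) 0 1 := by
      unfold seg pfx
      simp
    by_cases hcorner : rest = [] ∧ target < a0
    · -- n = 1 with a0 > target: A's guard is false at once; B's machine drops once to s = 0, stops;
      -- both collect no window and return -1
      obtain ⟨rfl, hlt⟩ := hcorner
      have hA : aLoop [a0] target (2 * [a0].length + 2) 0 1 a0 [] = [] :=
        aLoop_stop _ _ _ _ _ _ _ (by rintro ⟨-, h2 | h2⟩; exacts [by simp at h2, by omega])
      have hB : bRun [a0] target (2 * [a0].length + 2) 0 1 a0 [] = [] := by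
        have h4 : 2 * [a0].length + 2 = 3 + 1 := rfl
        rw [h4, bRun, if_neg (by rintro ⟨h1, -⟩; simp at h1),
          if_neg (by rintro ⟨h1, -⟩; omega), if_pos ⟨hlt, by omega⟩]
        have hz : a0 - [a0].getD 0 0 = 0 := by simp
        rw [hz]
        exact bRun_stop _ _ _ _ _ _ _ (by rintro ⟨h1, -⟩; simp at h1)
          (by rintro ⟨h1, -⟩; omega) (by rintro ⟨h1, -⟩; omega)
      show (let res := aLoop [a0] target (2 * [a0].length + 2) 0 1 a0 []
            let sres := PySem.List.sorted res (fun w => w.2 - w.1 + 1) false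
            if sres.length < 2 then (-1 : Int)
            else
              match sres with
              | [] => -1
              | w0 :: rest' =>
                match rest'.find? (fun w => decide (w0.2 < w.1) || decide (w.2 < w0.1)) with
                | some w => (w0.2 - w0.1 + 1) + (w.2 - w.1 + 1)
                | none => -1) =
          (let res := bRun [a0] target (2 * [a0].length + 2) 0 1 a0 []
           match bBest res with
           | none => (-1 : Int)
           | some best =>
             match bSecond best res with
             | none => -1
             | some sec => (best.2 - best.1 + 1) + (sec.2 - sec.1 + 1))
      rw [hA, hB]
      rfl
    · -- general case: the simulation applies from the initial state
      have hinv : (1 < (a0 :: rest).length ∨ a0 ≤ target ∨ 1 ≤ 0) := by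
        rcases Nat.lt_or_ge 1 (a0 :: rest).length with h | h
        · exact Or.inl h
        · have hrest : rest = [] := by
            cases rest with
            | nil => rfl
            | cons x xs => simp at h
          right; left
          by_contra hgt
          exact hcorner ⟨hrest, by omega⟩
      have hR : aLoop (a0 :: rest) target (2 * (a0 :: rest).length + 2) 0 1 a0 [] =
          bRun (a0 :: rest) target (2 * (a0 :: rest).length + 2) 0 1 a0 [] :=
        loopSim (a0 :: rest) target htg _ 0 1 a0 [] _ (by omega) (by simp) ha0 hinv
          (by omega) (by omega)
      have hii : ∀ p ∈ aLoop (a0 :: rest) target (2 * (a0 :: rest).length + 2) 0 1 a0 [], p.1 ≤ p.2 := by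
        intro p hp
        exact aLoop_windows (a0 :: rest) target htg _ 0 1 a0 []
          (by omega) (by simp) ha0 (by simp) p hp
      show (let res := aLoop (a0 :: rest) target (2 * (a0 :: rest).length + 2) 0 1 a0 []
            let sres := PySem.List.sorted res (fun w => w.2 - w.1 + 1) false
            if sres.length < 2 then (-1 : Int)
            else
              match sres with
              | [] => -1
              | w0 :: rest' =>
                match rest'.find? (fun w => decide (w0.2 < w.1) || decide (w.2 < w0.1)) with
                | some w => (w0.2 - w0.1 + 1) + (w.2 - w.1 + 1)
                | none => -1) =
          (let res := bRun (a0 :: rest) target (2 * (a0 :: rest).length + 2) 0 1 a0 []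
           match bBest res with
           | none => (-1 : Int)
           | some best =>
             match bSecond best res with
             | none => -1
             | some sec => (best.2 - best.1 + 1) + (sec.2 - sec.1 + 1))
      rw [← hR]
      exact select_eq _ hii

-- ===== VERDICT (by name: the statement is the Claim_ definition above) =====
theorem minSumOfLengths_spec : Claim_equal_minSumOfLengths := by
  intro arr target _ hpre
  unfold Spec_minSumOfLengths
  exact main_eq arr target hpre.1 hpre.2
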